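-- pv_equiv track=rewrite | github.com/Skill-Scanner/SkillScanner | violation-detector/3_get_intent_data_collection.py | spit_slot_name
-- ===== SOURCE A (Python) =====
-- def spit_slot_name(slot):
--     if 'AMAZON' in slot:
--         slot = slot.replace('AMAZON.', '')
--     if slot.isupper() or '_' in slot:
--         words = slot.lower().split('_')
--     else:
--         words = []
--         word = ''
--         for i in slot:
--             if i.islower():
--                 word = word + i
--             else:
--                 words.append(word.lower())
--                 word = i
--         words.append(word.lower())
--         if words[0] == '':
--             words = words[1:]
--     return words
-- ===== SOURCE B (Python) =====
-- def _low_run(s):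
--     # length of the longest all-lowercase prefix of s
--     k = 0
--     while k < len(s) and s[k].islower():
--         k += 1
--     return k
--
--
-- def spit_slot_name(slot):
--     if 'AMAZON' in slot:
--         slot = slot.replace('AMAZON.', '')
--     if slot.isupper() or '_' in slot:
--         return slot.lower().split('_')
--     # run-slicing: one word = a non-lowercase char plus the lowercase run after it
--     k = _low_run(slot)
--     words = [slot[:k].lower()] if k else []
--     rest = slot[k:]
--     while rest:
--         k = 1 + _low_run(rest[1:])
--         words.append(rest[:k].lower())
--         rest = rest[k:]
--     return words
-- ===== Notes on version B (the rewrite author's own statement) =====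
-- stated objective: alternative
-- what changed: The camelCase branch's per-character accumulation loop (with its trailing append and leading-empty fix-up) is replaced by run-slicing: compute the length of each lowercase run and slice whole words (boundary char + following run) out of the string; the two top guards are unchanged.
import Mathlib
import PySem

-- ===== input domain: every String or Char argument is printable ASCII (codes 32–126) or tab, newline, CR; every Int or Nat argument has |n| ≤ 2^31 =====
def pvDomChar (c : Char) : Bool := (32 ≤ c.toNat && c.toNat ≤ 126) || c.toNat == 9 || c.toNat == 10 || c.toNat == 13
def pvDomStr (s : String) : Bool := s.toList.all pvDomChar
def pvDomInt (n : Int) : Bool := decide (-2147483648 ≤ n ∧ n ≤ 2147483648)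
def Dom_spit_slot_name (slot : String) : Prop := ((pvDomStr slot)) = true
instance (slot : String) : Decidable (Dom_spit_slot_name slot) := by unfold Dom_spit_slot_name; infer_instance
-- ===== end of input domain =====

-- B replaces A's per-character accumulation loop (with its trailing append and leading-empty fix-up)
-- by run-slicing: find the lowercase run after each boundary and slice whole words out; same return value.

-- Python str.isupper(): at least one cased character and no lowercase one — exact on the ASCII domain,
-- where the cased characters are exactly the letters (the guard lines are identical in A and B, so both ports use it).
def pyStrIsupper (s : String) : Bool :=
  (s.toList.any (fun c => PySem.Chars.isupper c || PySem.Chars.islower c)) &&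
  (s.toList.all (fun c => !PySem.Chars.islower c))

-- ===== PORT A =====
def spit_slot_name (slot : String) : List String :=
  let slot := if PySem.Str.isIn "AMAZON" slot then PySem.Str.replace slot "AMAZON." "" else slot
  if pyStrIsupper slot || PySem.Str.isIn "_" slot then
    (PySem.Str.split? (PySem.Str.lower slot) "_").getD []   -- sep = "_" ≠ "", so split? is never none
  else
    -- for i in slot: accumulate (words, word); Python str concatenation ported on List Char
    let st := slot.toList.foldl
      (fun (st : List String × List Char) i =>
        if PySem.Chars.islower i then (st.1, st.2 ++ [i])
        else (st.1 ++ [String.ofList (PySem.Chars.lower st.2)], [i]))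
      ([], [])
    let words := st.1 ++ [String.ofList (PySem.Chars.lower st.2)]
    if PySem.List.pyGet? words 0 = some "" then PySem.List.slice words (some 1) none else words

-- ===== PORT B =====
-- _low_run: length of the longest all-lowercase prefix (the counting while-loop, as structural recursion)
def lowRun : List Char → Nat
  | [] => 0
  | c :: t => if PySem.Chars.islower c then lowRun t + 1 else 0

-- the while-loop of Source B: each step slices off rest[:k] with k = 1 + _low_run(rest[1:])
-- (rest[:k] / rest[k:] with 0 ≤ k are take/drop — PySem.List.slice_to_natCast / slice_from_natCast)
def bRuns : List Char → List String
  | [] => []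
  | c :: t =>
    String.ofList (PySem.Chars.lower ((c :: t).take (1 + lowRun t)))
      :: bRuns ((c :: t).drop (1 + lowRun t))
termination_by rest => rest.length
decreasing_by simp

def spit_slot_name_alt (slot : String) : List String :=
  let slot := if PySem.Str.isIn "AMAZON" slot then PySem.Str.replace slot "AMAZON." "" else slot
  if pyStrIsupper slot || PySem.Str.isIn "_" slot then
    (PySem.Str.split? (PySem.Str.lower slot) "_").getD []
  else
    let l := slot.toList
    let k := lowRun l
    (if k ≠ 0 then [String.ofList (PySem.Chars.lower (l.take k))] else []) ++ bRuns (l.drop k)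

-- ===== PRECONDITION & SPEC =====
def Spec_spit_slot_name (slot : String) (out : List String) : Prop := out = spit_slot_name_alt slot
instance (slot : String) (out : List String) : Decidable (Spec_spit_slot_name slot out) := by unfold Spec_spit_slot_name; infer_instance

-- ===== CLAIM (what is proved, stated in full; the proofs are below) =====
def Claim_equal_spit_slot_name : Prop := ∀ (slot : String), Dom_spit_slot_name slot → Spec_spit_slot_name slot (spit_slot_name slot)

-- ===== LEMMAS AND PROOFS =====

theorem bRuns_cons (c : Char) (t : List Char) :
    bRuns (c :: t) = String.ofList (PySem.Chars.lower (c :: t.take (lowRun t))) :: bRuns (t.drop (lowRun t)) := by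
  rw [bRuns.eq_def]
  simp [Nat.add_comm]

/-- A's loop (with the trailing append already done) equals B's run-slicing, for any starting state. -/
theorem foldA_eq (l : List Char) : ∀ (ws : List String) (w : List Char),
    (l.foldl
        (fun (st : List String × List Char) i =>
          if PySem.Chars.islower i then (st.1, st.2 ++ [i])
          else (st.1 ++ [String.ofList (PySem.Chars.lower st.2)], [i]))
        (ws, w)).1
      ++ [String.ofList (PySem.Chars.lower
            (l.foldl
              (fun (st : List String × List Char) i =>
                if PySem.Chars.islower i then (st.1, st.2 ++ [i])
                else (st.1 ++ [String.ofList (PySem.Chars.lower st.2)], [i]))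
              (ws, w)).2)]
    = ws ++ [String.ofList (PySem.Chars.lower (w ++ l.take (lowRun l)))] ++ bRuns (l.drop (lowRun l)) := by
  induction l with
  | nil => intro ws w; rw [bRuns.eq_def]; simp
  | cons c t ih =>
    intro ws w
    by_cases h : PySem.Chars.islower c = true
    · have key := ih ws (w ++ [c])
      simp only [List.foldl_cons, h, lowRun, if_true] at key ⊢
      rw [key]
      simp
    · have key := ih (ws ++ [String.ofList (PySem.Chars.lower w)]) [c]
      simp only [List.foldl_cons, h, lowRun, if_false, Bool.false_eq_true] at key ⊢
      rw [key]
      simp only [List.take_zero, List.drop_zero]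
      rw [bRuns_cons]
      simp

theorem ofList_lower_eq_empty_iff (x : List Char) :
    String.ofList (PySem.Chars.lower x) = "" ↔ x = [] := by
  constructor
  · intro h
    have h2 : PySem.Chars.lower x = [] := by
      have := congrArg String.toList h
      simpa using this
    simpa [PySem.Chars.lower] using h2
  · rintro rfl; rfl

-- ===== VERDICT (by name: the statement is the Claim_ definition above) =====
theorem spit_slot_name_spec : Claim_equal_spit_slot_name := by
  intro slot _
  show spit_slot_name slot = spit_slot_name_alt slot
  unfold spit_slot_name spit_slot_name_alt
  generalize (if PySem.Str.isIn "AMAZON" slot = true then PySem.Str.replace slot "AMAZON." "" else slot) = s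
  by_cases hg : (pyStrIsupper s || PySem.Str.isIn "_" s) = true
  · simp only [hg, if_true]
  · simp only [hg, if_false, Bool.false_eq_true]
    have key := foldA_eq s.toList [] []
    simp only [List.nil_append] at key
    rw [key]
    by_cases hk : lowRun s.toList = 0
    · rw [hk]
      simp [PySem.List.pyGet?, PySem.List.pyIdx?, PySem.List.slice_from_one, PySem.Chars.lower]
    · have hne : s.toList.take (lowRun s.toList) ≠ [] := by
        intro h
        rcases List.take_eq_nil_iff.mp h with h1 | h1
        · exact hk h1
        · rw [h1] at hk; exact hk rfl
      have h0 : ¬ (String.ofList (PySem.Chars.lower (s.toList.take (lowRun s.toList))) = "") := by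
        rw [ofList_lower_eq_empty_iff]; exact hne
      simp [hk, h0, PySem.List.pyGet?, PySem.List.pyIdx?]
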